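-- pv_equiv track=rewrite | github.com/Frosselet/pdf-ocr | src/pdf_ocr/compress.py | _compute_column_bounds
-- ===== SOURCE A (Python) =====
-- def _compute_column_bounds(
--     data_rows: list[list[tuple[int, str]]],
--     col_map: dict[int, int],
--     num_cols: int,
-- ) -> list[tuple[int, int]]:
--     """Compute column bounds (min_start, max_end) from data rows.
--
--     For each column, finds the leftmost start position and rightmost end
--     position across all data spans assigned to that column. This captures
--     the full horizontal extent of each column regardless of alignment
--     (left, right, or center).
--
--     Returns a list of (min_start, max_end) tuples, one per column.
--     Columns with no data get bounds (0, 0).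
--     """
--     bounds: list[list[int]] = [[float('inf'), 0] for _ in range(num_cols)]  # type: ignore[misc]
--
--     for row in data_rows:
--         for col, text in row:
--             ci = col_map.get(col)
--             if ci is not None:
--                 start = col
--                 end = col + len(text)
--                 bounds[ci][0] = min(bounds[ci][0], start)
--                 bounds[ci][1] = max(bounds[ci][1], end)
--
--     # Convert to tuples, defaulting empty columns to (0, 0)
--     result: list[tuple[int, int]] = []
--     for min_s, max_e in bounds:
--         if min_s == float('inf'):
--             result.append((0, 0))
--         else:
--             result.append((min_s, max_e))
--
--     return result
-- ===== SOURCE B (Python) =====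
-- def _compute_column_bounds(
--     data_rows: list[list[tuple[int, str]]],
--     col_map: dict[int, int],
--     num_cols: int,
-- ) -> list[tuple[int, int]]:
--     """Collect the (start, end) spans of each column into a bucket in one
--     pass, then reduce each bucket to (min start, max end); empty -> (0, 0)."""
--     buckets: list[list[tuple[int, int]]] = [[] for _ in range(num_cols)]
--     for row in data_rows:
--         for col, text in row:
--             ci = col_map.get(col)
--             if ci is not None:
--                 buckets[ci].append((col, col + len(text)))
--     return [
--         (min(s for s, _ in spans), max(e for _, e in spans)) if spans else (0, 0)
--         for spans in buckets
--     ]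
-- ===== Notes on version B (the rewrite author's own statement) =====
-- stated objective: alternative
-- what changed: Replaces A's running inf/0 sentinel min/max accumulator with a collect pass that appends each span's (start, end) into a per-column bucket, followed by a separate reduce pass taking min of starts and max of ends per bucket.
-- intended difference: On inputs where some column's spans all end left of position 0 (every col + len(text) < 0), A returns (min_start, 0) for that column because its running max starts at the sentinel 0, while B returns (min_start, max_end), the actual rightmost end, which is the intended horizontal extent. — e.g. on _compute_column_bounds([[(-5, "x")]], [(-5, 0)], 1): A returns [(-5, 0)], B returns [(-5, -4)]
import Mathlib
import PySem

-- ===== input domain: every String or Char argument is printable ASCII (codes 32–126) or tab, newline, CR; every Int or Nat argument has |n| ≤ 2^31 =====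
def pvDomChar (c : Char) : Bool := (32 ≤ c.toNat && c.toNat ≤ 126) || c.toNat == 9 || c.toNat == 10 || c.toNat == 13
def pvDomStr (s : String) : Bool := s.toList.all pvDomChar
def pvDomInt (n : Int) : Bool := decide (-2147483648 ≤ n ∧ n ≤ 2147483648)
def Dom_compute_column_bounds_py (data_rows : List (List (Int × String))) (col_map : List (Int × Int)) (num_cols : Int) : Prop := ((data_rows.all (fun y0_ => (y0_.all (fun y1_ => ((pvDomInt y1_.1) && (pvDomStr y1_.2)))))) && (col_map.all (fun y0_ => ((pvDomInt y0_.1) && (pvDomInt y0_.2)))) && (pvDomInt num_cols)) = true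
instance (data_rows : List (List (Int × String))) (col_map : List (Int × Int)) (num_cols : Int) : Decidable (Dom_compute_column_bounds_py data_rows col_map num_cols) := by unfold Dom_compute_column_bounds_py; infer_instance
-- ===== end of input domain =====

-- B replaces A's running inf/0 sentinel min/max accumulator by a collect-into-per-column-buckets
-- pass followed by a per-bucket reduce (objective: alternative decomposition, same cost).

-- ===== PORT A =====
-- The float sentinel inf in bounds[ci][0] is represented as Option.none (min(inf, s) = s exactly).
def compute_column_bounds_py (data_rows : List (List (Int × String))) (col_map : List (Int × Int)) (num_cols : Int) : List (Int × Int) :=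
  let bounds0 : List (Option Int × Int) := (PySem.List.pyRange 0 num_cols 1).map (fun _ => (none, 0))
  let bounds := data_rows.foldl (fun bounds row =>
    row.foldl (fun bounds p =>
      match PySem.Dict.get? ⟨col_map⟩ p.1 with
      | none => bounds
      | some ci =>
        let b := PySem.List.pyGetD bounds ci (none, 0)
        PySem.List.pySetD bounds ci
          ((match b.1 with
            | none => some p.1
            | some m => some (min m p.1)), max b.2 (p.1 + PySem.Str.len p.2))) bounds) bounds0
  bounds.foldl (fun result b =>
    match b.1 with
    | none => result ++ [((0 : Int), (0 : Int))]
    | some min_s => result ++ [(min_s, b.2)]) []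

-- ===== PORT B =====
def compute_column_bounds_py_alt (data_rows : List (List (Int × String))) (col_map : List (Int × Int)) (num_cols : Int) : List (Int × Int) :=
  let buckets0 : List (List (Int × Int)) := (PySem.List.pyRange 0 num_cols 1).map (fun _ => [])
  let buckets := data_rows.foldl (fun bs row =>
    row.foldl (fun bs p =>
      match PySem.Dict.get? ⟨col_map⟩ p.1 with
      | none => bs
      | some ci =>
          PySem.List.pySetD bs ci
            (PySem.List.pyGetD bs ci [] ++ [(p.1, p.1 + PySem.Str.len p.2)])) bs) buckets0
  buckets.map (fun spans =>
    if spans.isEmpty then ((0 : Int), (0 : Int))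
    else ((PySem.List.min? (spans.map Prod.fst) (fun y => y)).getD 0,
          (PySem.List.max? (spans.map Prod.snd) (fun y => y)).getD 0))

-- ===== PRECONDITION & SPEC =====
-- helper for D_ (input inspection only, reaches no port): the column slot a span lands in
def pvCi (col_map : List (Int × Int)) (num_cols : Int) (p : Int × String) : Option Nat :=
  (PySem.Dict.get? ⟨col_map⟩ p.1).bind (PySem.List.pyIdx? num_cols.toNat)

-- Pre_ excludes exactly the inputs on which A raises IndexError: a span whose mapped
-- column index ci falls outside the bounds list (ci < -num_cols or ci ≥ num_cols).
def Pre_compute_column_bounds_py (data_rows : List (List (Int × String))) (col_map : List (Int × Int)) (num_cols : Int) : Prop :=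
  (data_rows.all (fun row => row.all (fun p =>
    match PySem.Dict.get? ⟨col_map⟩ p.1 with
    | none => true
    | some ci => decide (PySem.Raise.InRange num_cols.toNat ci)))) = true
instance (data_rows : List (List (Int × String))) (col_map : List (Int × Int)) (num_cols : Int) : Decidable (Pre_compute_column_bounds_py data_rows col_map num_cols) := by unfold Pre_compute_column_bounds_py; infer_instance

def pvWitness_compute_column_bounds_py : (List (List (Int × String))) × (List (Int × Int)) × Int :=
  ([[(0, "ab"), (5, "c")], [(1, "xy")]], [(0, 0), (5, 1), (1, 0)], 2)

-- On inputs where some column's spans all end left of position 0 (every col + len(text) < 0),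
-- A returns (min_start, 0) for that column because its running max starts at the sentinel 0,
-- while B returns (min_start, max_end), the actual rightmost end — the intended extent.
def D_compute_column_bounds_py (data_rows : List (List (Int × String))) (col_map : List (Int × Int)) (num_cols : Int) : Prop :=
  (data_rows.flatten.any (fun p => (pvCi col_map num_cols p).isSome &&
    data_rows.flatten.all (fun q =>
      pvCi col_map num_cols q != pvCi col_map num_cols p ||
      decide (q.1 + PySem.Str.len q.2 < 0)))) = true
instance (data_rows : List (List (Int × String))) (col_map : List (Int × Int)) (num_cols : Int) : Decidable (D_compute_column_bounds_py data_rows col_map num_cols) := by unfold D_compute_column_bounds_py; infer_instance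

def Spec_compute_column_bounds_py (data_rows : List (List (Int × String))) (col_map : List (Int × Int)) (num_cols : Int) (out : List (Int × Int)) : Prop := ¬ D_compute_column_bounds_py data_rows col_map num_cols → out = compute_column_bounds_py_alt data_rows col_map num_cols
instance (data_rows : List (List (Int × String))) (col_map : List (Int × Int)) (num_cols : Int) (out : List (Int × Int)) : Decidable (Spec_compute_column_bounds_py data_rows col_map num_cols out) := by unfold Spec_compute_column_bounds_py; infer_instance

def pvDiffWitness_compute_column_bounds_py : (List (List (Int × String))) × (List (Int × Int)) × Int :=
  ([[(-5, "x")]], [(-5, 0)], 1)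
def pvDiffWitnessOut_compute_column_bounds_py : (List (Int × Int)) × (List (Int × Int)) :=
  ([(-5, 0)], [(-5, -4)])

-- ===== CLAIM (what is proved, stated in full; the proofs are below) =====
def Claim_unchanged_compute_column_bounds_py : Prop := ∀ (data_rows : List (List (Int × String))) (col_map : List (Int × Int)) (num_cols : Int), Dom_compute_column_bounds_py data_rows col_map num_cols → Pre_compute_column_bounds_py data_rows col_map num_cols → Spec_compute_column_bounds_py data_rows col_map num_cols (compute_column_bounds_py data_rows col_map num_cols)
def Claim_changed_compute_column_bounds_py : Prop := Dom_compute_column_bounds_py (pvDiffWitness_compute_column_bounds_py.1) (pvDiffWitness_compute_column_bounds_py.2.1) (pvDiffWitness_compute_column_bounds_py.2.2) ∧ Pre_compute_column_bounds_py (pvDiffWitness_compute_column_bounds_py.1) (pvDiffWitness_compute_column_bounds_py.2.1) (pvDiffWitness_compute_column_bounds_py.2.2) ∧ D_compute_column_bounds_py (pvDiffWitness_compute_column_bounds_py.1) (pvDiffWitness_compute_column_bounds_py.2.1) (pvDiffWitness_compute_column_bounds_py.2.2) ∧ compute_column_bounds_py (pvDiffWitness_compute_column_bounds_py.1) (pvDiffWitness_compute_column_bounds_py.2.1)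 (pvDiffWitness_compute_column_bounds_py.2.2) = pvDiffWitnessOut_compute_column_bounds_py.1 ∧ compute_column_bounds_py_alt (pvDiffWitness_compute_column_bounds_py.1) (pvDiffWitness_compute_column_bounds_py.2.1) (pvDiffWitness_compute_column_bounds_py.2.2) = pvDiffWitnessOut_compute_column_bounds_py.2 ∧ pvDiffWitnessOut_compute_column_bounds_py.1 ≠ pvDiffWitnessOut_compute_column_bounds_py.2
def Claim_exact_compute_column_bounds_py : Prop := ∀ (data_rows : List (List (Int × String))) (col_map : List (Int × Int)) (num_cols : Int), Dom_compute_column_bounds_py data_rows col_map num_cols → Pre_compute_column_bounds_py data_rows col_map num_cols → D_compute_column_bounds_py data_rows col_map num_cols → compute_column_bounds_py data_rows col_map num_cols ≠ compute_column_bounds_py_alt data_rows col_map num_cols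

-- ===== LEMMAS AND PROOFS =====

-- proof-side: the list of spans sent to column slot k
def pvSpans1 (col_map : List (Int × Int)) (num_cols : Int) (k : Nat) (p : Int × String) : Option (Int × Int) :=
  match PySem.Dict.get? ⟨col_map⟩ p.1 with
  | none => none
  | some ci =>
    match PySem.List.pyIdx? num_cols.toNat ci with
    | some j => if j = k then some (p.1, p.1 + PySem.Str.len p.2) else none
    | none => none

def pvSpans (data_rows : List (List (Int × String))) (col_map : List (Int × Int)) (num_cols : Int) (k : Nat) : List (Int × Int) :=
  data_rows.flatten.filterMap (pvSpans1 col_map num_cols k)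

theorem pv_spans1_eq (col_map : List (Int × Int)) (num_cols : Int) (k : Nat) (p : Int × String) :
    pvSpans1 col_map num_cols k p =
      if pvCi col_map num_cols p = some k then some (p.1, p.1 + PySem.Str.len p.2) else none := by
  unfold pvSpans1 pvCi
  cases PySem.Dict.get? (⟨col_map⟩ : PySem.Dict Int Int) p.1 with
  | none => rfl
  | some ci =>
      show (match PySem.List.pyIdx? num_cols.toNat ci with
            | some j => if j = k then some (p.1, p.1 + PySem.Str.len p.2) else none
            | none => none) = _
      cases h : PySem.List.pyIdx? num_cols.toNat ci with
      | none => simp [h]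
      | some j =>
          by_cases hk : j = k
          · simp [h, hk]
          · simp [h, hk, Ne.symm hk]

theorem pv_idx_lt {n : Nat} {i : Int} {j : Nat} (h : PySem.List.pyIdx? n i = some j) : j < n := by
  unfold PySem.List.pyIdx? at h
  split_ifs at h <;> simp_all <;> omega

theorem pv_D_iff (data_rows : List (List (Int × String))) (col_map : List (Int × Int)) (num_cols : Int) :
    D_compute_column_bounds_py data_rows col_map num_cols ↔
      ∃ k, k < num_cols.toNat ∧ pvSpans data_rows col_map num_cols k ≠ [] ∧
        ∀ p ∈ pvSpans data_rows col_map num_cols k, p.2 < 0 := by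
  unfold D_compute_column_bounds_py
  simp only [List.any_eq_true, Bool.and_eq_true, List.all_eq_true, Bool.or_eq_true,
    bne_iff_ne, ne_eq, decide_eq_true_eq, Option.isSome_iff_exists]
  constructor
  · rintro ⟨p, hp, ⟨k, hk⟩, hall⟩
    refine ⟨k, ?_, ?_, ?_⟩
    · obtain ⟨ci, hci, hidx⟩ := Option.bind_eq_some_iff.1 hk
      exact pv_idx_lt hidx
    · have : (p.1, p.1 + PySem.Str.len p.2) ∈ pvSpans data_rows col_map num_cols k := by
        rw [pvSpans, List.mem_filterMap]
        exact ⟨p, hp, by rw [pv_spans1_eq, if_pos hk]⟩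
      intro hnil
      rw [hnil] at this
      exact absurd this (List.not_mem_nil)
    · intro x hx
      rw [pvSpans, List.mem_filterMap] at hx
      obtain ⟨q, hq, hq2⟩ := hx
      rw [pv_spans1_eq] at hq2
      by_cases hci : pvCi col_map num_cols q = some k
      · rw [if_pos hci] at hq2
        have := hall q hq
        rcases this with hne | hlt
        · exact absurd (hci.trans hk.symm) hne
        · cases hq2; simpa using hlt
      · rw [if_neg hci] at hq2
        exact absurd hq2 (by simp)
  · rintro ⟨k, hk, hne, hall⟩
    obtain ⟨x, hx⟩ := List.exists_mem_of_ne_nil _ hne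
    rw [pvSpans, List.mem_filterMap] at hx
    obtain ⟨p, hp, hp2⟩ := hx
    rw [pv_spans1_eq] at hp2
    by_cases hci : pvCi col_map num_cols p = some k
    case neg => rw [if_neg hci] at hp2; exact absurd hp2 (by simp)
    refine ⟨p, hp, ⟨k, hci⟩, ?_⟩
    intro q hq
    by_cases hq2 : pvCi col_map num_cols q = some k
    · right
      have : (q.1, q.1 + PySem.Str.len q.2) ∈ pvSpans data_rows col_map num_cols k := by
        rw [pvSpans, List.mem_filterMap]
        exact ⟨q, hq, by rw [pv_spans1_eq, if_pos hq2]⟩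
      simpa using hall _ this
    · left
      rw [hci]
      exact hq2

-- proof-side names for the two fold bodies and the two finishers
def pvFA (col_map : List (Int × Int)) (bounds : List (Option Int × Int)) (p : Int × String) : List (Option Int × Int) :=
  match PySem.Dict.get? ⟨col_map⟩ p.1 with
  | none => bounds
  | some ci =>
    let b := PySem.List.pyGetD bounds ci (none, 0)
    PySem.List.pySetD bounds ci
      ((match b.1 with
        | none => some p.1
        | some m => some (min m p.1)), max b.2 (p.1 + PySem.Str.len p.2))

def pvFB (col_map : List (Int × Int)) (bs : List (List (Int × Int))) (p : Int × String) : List (List (Int × Int)) :=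
  match PySem.Dict.get? ⟨col_map⟩ p.1 with
  | none => bs
  | some ci =>
      PySem.List.pySetD bs ci
        (PySem.List.pyGetD bs ci [] ++ [(p.1, p.1 + PySem.Str.len p.2)])

def pvAcc (b : Option Int × Int) (s : Int × Int) : Option Int × Int :=
  ((match b.1 with
    | none => some s.1
    | some m => some (min m s.1)), max b.2 s.2)

def pvConvA (b : Option Int × Int) : Int × Int :=
  match b.1 with
  | none => ((0 : Int), (0 : Int))
  | some m => (m, b.2)

def pvRed (spans : List (Int × Int)) : Int × Int :=
  if spans.isEmpty then ((0 : Int), (0 : Int))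
  else ((PySem.List.min? (spans.map Prod.fst) (fun y => y)).getD 0,
        (PySem.List.max? (spans.map Prod.snd) (fun y => y)).getD 0)

theorem pv_conv_loop (xs : List (Option Int × Int)) (acc : List (Int × Int)) :
    xs.foldl (fun result b =>
      match b.1 with
      | none => result ++ [((0 : Int), (0 : Int))]
      | some min_s => result ++ [(min_s, b.2)]) acc = acc ++ xs.map pvConvA := by
  induction xs generalizing acc with
  | nil => simp
  | cons x t ih =>
      obtain ⟨m, e⟩ := x
      cases m <;> simp [ih, pvConvA]

theorem pv_A_unfold (data_rows : List (List (Int × String))) (col_map : List (Int × Int)) (num_cols : Int) :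
    compute_column_bounds_py data_rows col_map num_cols =
      (data_rows.flatten.foldl (pvFA col_map)
        ((PySem.List.pyRange 0 num_cols 1).map (fun _ => (none, 0)))).map pvConvA := by
  unfold compute_column_bounds_py
  rw [List.foldl_flatten, pv_conv_loop]
  rfl

theorem pv_B_unfold (data_rows : List (List (Int × String))) (col_map : List (Int × Int)) (num_cols : Int) :
    compute_column_bounds_py_alt data_rows col_map num_cols =
      (data_rows.flatten.foldl (pvFB col_map)
        ((PySem.List.pyRange 0 num_cols 1).map (fun _ => []))).map pvRed := by
  unfold compute_column_bounds_py_alt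
  rw [List.foldl_flatten]
  rfl

theorem pv_idx_inrange {n : Nat} {i : Int} (h : PySem.Raise.InRange n i) :
    ∃ j : Nat, PySem.List.pyIdx? n i = some j ∧ j < n := by
  obtain ⟨h1, h2⟩ := h
  unfold PySem.List.pyIdx?
  by_cases h3 : 0 ≤ i
  · rw [if_pos h3, if_pos h2]
    exact ⟨i.toNat, rfl, by omega⟩
  · rw [if_neg h3, if_pos h1]
    exact ⟨n - (-i).toNat, rfl, by omega⟩

theorem pv_getD_idx {α : Type} {xs : List α} {i : Int} {j : Nat} (d : α)
    (hl : PySem.List.pyIdx? xs.length i = some j) (hj : j < xs.length) :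
    PySem.List.pyGetD xs i d = xs[j] := by
  simp [PySem.List.pyGetD, PySem.List.pyGet?, hl, List.getElem?_eq_getElem hj]

theorem pv_setD_idx {α : Type} {xs : List α} {i : Int} {j : Nat} (v : α)
    (hl : PySem.List.pyIdx? xs.length i = some j) :
    PySem.List.pySetD xs i v = xs.set j v := by
  simp [PySem.List.pySetD, PySem.List.pySet?, hl]

-- invariant for B's fold: bucket k accumulates exactly the spans pvSpans1 sends to k
theorem pv_invB (col_map : List (Int × Int)) (num_cols : Int) (L : List (Int × String))
    (bs : List (List (Int × Int))) (hlen : bs.length = num_cols.toNat)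
    (hpre : ∀ p ∈ L, ∀ ci, PySem.Dict.get? ⟨col_map⟩ p.1 = some ci → PySem.Raise.InRange num_cols.toNat ci) :
    (L.foldl (pvFB col_map) bs).length = num_cols.toNat ∧
    ∀ k : Nat, (L.foldl (pvFB col_map) bs)[k]? =
      (bs[k]?).map (fun s => s ++ L.filterMap (pvSpans1 col_map num_cols k)) := by
  induction L generalizing bs with
  | nil => simp [hlen]
  | cons p t ih =>
      simp only [List.foldl_cons]
      cases hg : PySem.Dict.get? (⟨col_map⟩ : PySem.Dict Int Int) p.1 with
      | none =>
          have hstep : pvFB col_map bs p = bs := by rw [pvFB, hg]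
          rw [hstep]
          obtain ⟨l1, l2⟩ := ih bs hlen (fun q hq => hpre q (List.mem_cons_of_mem _ hq))
          refine ⟨l1, fun k => ?_⟩
          rw [l2 k]
          have hnone : pvSpans1 col_map num_cols k p = none := by simp [pvSpans1, hg]
          simp [hnone]
      | some ci =>
          have hin := hpre p (List.mem_cons_self) ci hg
          obtain ⟨j, hidx, hj⟩ := pv_idx_inrange hin
          have hj' : j < bs.length := by omega
          have hstep : pvFB col_map bs p =
              bs.set j (bs[j] ++ [(p.1, p.1 + PySem.Str.len p.2)]) := by
            simp only [pvFB, hg]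
            rw [pv_getD_idx _ (by rwa [hlen]) hj', pv_setD_idx _ (by rwa [hlen])]
          rw [hstep]
          have := ih (bs.set j (bs[j] ++ [(p.1, p.1 + PySem.Str.len p.2)]))
            (by simpa using hlen) (fun q hq => hpre q (List.mem_cons_of_mem _ hq))
          refine ⟨this.1, fun k => ?_⟩
          rw [this.2 k]
          by_cases hk : j = k
          · subst hk
            simp only [List.getElem?_set, if_pos hj', List.getElem?_eq_getElem hj']
            simp [pvSpans1, hg, hidx]
          · simp only [List.getElem?_set, if_neg hk]
            have : pvSpans1 col_map num_cols k p = none := by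
              simp [pvSpans1, hg, hidx, hk]
            simp [this]

-- joint invariant: A's accumulator at slot k is the pvAcc-fold of B's bucket at slot k
theorem pv_invAB (col_map : List (Int × Int)) (num_cols : Int) (L : List (Int × String))
    (bA : List (Option Int × Int)) (bB : List (List (Int × Int)))
    (hA : bA.length = num_cols.toNat) (hB : bB.length = num_cols.toNat)
    (hpre : ∀ p ∈ L, ∀ ci, PySem.Dict.get? ⟨col_map⟩ p.1 = some ci → PySem.Raise.InRange num_cols.toNat ci)
    (hrel : ∀ k : Nat, bA[k]? = (bB[k]?).map (fun s => s.foldl pvAcc (none, 0))) :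
    ∀ k : Nat, (L.foldl (pvFA col_map) bA)[k]? =
      ((L.foldl (pvFB col_map) bB)[k]?).map (fun s => s.foldl pvAcc (none, 0)) := by
  induction L generalizing bA bB with
  | nil => simpa using hrel
  | cons p t ih =>
      simp only [List.foldl_cons]
      cases hg : PySem.Dict.get? (⟨col_map⟩ : PySem.Dict Int Int) p.1 with
      | none =>
          have hA' : pvFA col_map bA p = bA := by rw [pvFA, hg]
          have hB' : pvFB col_map bB p = bB := by rw [pvFB, hg]
          rw [hA', hB']
          exact ih bA bB hA hB (fun q hq => hpre q (List.mem_cons_of_mem _ hq)) hrel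
      | some ci =>
          have hin := hpre p (List.mem_cons_self) ci hg
          obtain ⟨j, hidx, hj⟩ := pv_idx_inrange hin
          have hjA : j < bA.length := by omega
          have hjB : j < bB.length := by omega
          have hAj : bA[j] = bB[j].foldl pvAcc (none, 0) := by
            have := hrel j
            rw [List.getElem?_eq_getElem hjA, List.getElem?_eq_getElem hjB] at this
            simpa using this
          have hstepA : pvFA col_map bA p = bA.set j (pvAcc bA[j] (p.1, p.1 + PySem.Str.len p.2)) := by
            simp only [pvFA, hg]
            rw [pv_getD_idx _ (by rwa [hA]) hjA, pv_setD_idx _ (by rwa [hA])]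
            rfl
          have hstepB : pvFB col_map bB p =
              bB.set j (bB[j] ++ [(p.1, p.1 + PySem.Str.len p.2)]) := by
            simp only [pvFB, hg]
            rw [pv_getD_idx _ (by rwa [hB]) hjB, pv_setD_idx _ (by rwa [hB])]
          rw [hstepA, hstepB]
          refine ih _ _ (by simpa using hA) (by simpa using hB)
            (fun q hq => hpre q (List.mem_cons_of_mem _ hq)) (fun k => ?_)
          by_cases hk : j = k
          · subst hk
            simp [hjA, hjB, hAj, List.foldl_append]
          · simp only [List.getElem?_set, if_neg hk]
            exact hrel k

theorem pv_acc_fst (S : List (Int × Int)) (m : Option Int) (e : Int) :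
    (S.foldl pvAcc (m, e)).1 =
      (S.map Prod.fst).foldl (fun m s =>
        match m with
        | none => some s
        | some m => some (min m s)) m := by
  induction S generalizing m e with
  | nil => rfl
  | cons x t ih => simpa [pvAcc] using ih _ _

theorem pv_acc_snd (S : List (Int × Int)) (m : Option Int) (e : Int) :
    (S.foldl pvAcc (m, e)).2 = (S.map Prod.snd).foldl max e := by
  induction S generalizing m e with
  | nil => rfl
  | cons x t ih => simpa [pvAcc] using ih _ _

theorem pv_omin_some (t : List Int) (s : Int) :
    t.foldl (fun m s =>
      match m with
      | none => some s
      | some m => some (min m s)) (some s) = some (t.foldl min s) := by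
  induction t generalizing s with
  | nil => rfl
  | cons x t ih => simpa using ih _

theorem pv_max_zero_foldl (t : List Int) (e : Int) :
    t.foldl max (max 0 e) = max 0 (t.foldl max e) := by
  induction t generalizing e with
  | nil => rfl
  | cons x u ih =>
      simp only [List.foldl_cons]
      rw [max_assoc, ih]

theorem pv_foldl_max_neg (t : List Int) (e : Int) (he : e < 0) (ht : ∀ x ∈ t, x < 0) :
    t.foldl max e < 0 := by
  induction t generalizing e with
  | nil => exact he
  | cons x u ih =>
      exact ih (max e x) (by have := ht x List.mem_cons_self; omega)
        (fun y hy => ht y (List.mem_cons_of_mem _ hy))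

theorem pv_convA_some {b : Option Int × Int} {m : Int} (h : b.1 = some m) :
    pvConvA b = (m, b.2) := by
  obtain ⟨b1, b2⟩ := b
  cases b1 <;> simp_all [pvConvA]

theorem pv_col_eq (S : List (Int × Int)) (h : S ≠ [] → ∃ p ∈ S, 0 ≤ p.2) :
    pvConvA (S.foldl pvAcc (none, 0)) = pvRed S := by
  cases S with
  | nil => rfl
  | cons s t =>
      have hfst : (List.foldl pvAcc ((none : Option Int), (0 : Int)) (s :: t)).1 =
          some ((t.map Prod.fst).foldl min s.1) := by
        rw [pv_acc_fst]
        simp only [List.map_cons, List.foldl_cons]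
        exact pv_omin_some _ _
      have hsnd : (List.foldl pvAcc ((none : Option Int), (0 : Int)) (s :: t)).2 =
          max 0 ((t.map Prod.snd).foldl max s.2) := by
        rw [pv_acc_snd]
        simp only [List.map_cons, List.foldl_cons]
        exact pv_max_zero_foldl _ _
      have hMnn : 0 ≤ (t.map Prod.snd).foldl max s.2 := by
        obtain ⟨p, hp, hp2⟩ := h (by simp)
        rcases List.mem_cons.1 hp with rfl | hp
        · exact le_trans hp2 (PySem.List.le_foldl_max _ _).1
        · exact le_trans hp2 ((PySem.List.le_foldl_max _ _).2 _ (List.mem_map_of_mem hp))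
      have hred : pvRed (s :: t) =
          ((t.map Prod.fst).foldl min s.1, (t.map Prod.snd).foldl max s.2) := by
        rw [pvRed]
        simp [PySem.List.min?_id_cons, PySem.List.max?_id_cons]
      rw [pv_convA_some hfst, hsnd, max_eq_right hMnn, hred]

theorem pv_col_ne (S : List (Int × Int)) (hne : S ≠ []) (hall : ∀ p ∈ S, p.2 < 0) :
    pvConvA (S.foldl pvAcc (none, 0)) ≠ pvRed S := by
  cases S with
  | nil => exact absurd rfl hne
  | cons s t =>
      have hsnd : (List.foldl pvAcc ((none : Option Int), (0 : Int)) (s :: t)).2 =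
          max 0 ((t.map Prod.snd).foldl max s.2) := by
        rw [pv_acc_snd]
        simp only [List.map_cons, List.foldl_cons]
        exact pv_max_zero_foldl _ _
      have hM : (t.map Prod.snd).foldl max s.2 < 0 := by
        refine pv_foldl_max_neg _ _ (hall s List.mem_cons_self) ?_
        intro y hy
        obtain ⟨p, hp, rfl⟩ := List.mem_map.1 hy
        exact hall p (List.mem_cons_of_mem _ hp)
      have hred : (pvRed (s :: t)).2 = (t.map Prod.snd).foldl max s.2 := by
        rw [pvRed]
        simp [PySem.List.max?_id_cons]
      intro hEq
      have h2 := congrArg Prod.snd hEq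
      have hA2 : (pvConvA ((s :: t).foldl pvAcc ((none : Option Int), (0 : Int)))).2 = 0 := by
        unfold pvConvA
        split
        · rfl
        · simp only []
          rw [hsnd]
          omega
      rw [hA2, hred] at h2
      omega

-- Pre_ in pointwise form over the flattened spans
theorem pv_pre_flat {data_rows : List (List (Int × String))} {col_map : List (Int × Int)} {num_cols : Int}
    (hpre : Pre_compute_column_bounds_py data_rows col_map num_cols) :
    ∀ p ∈ data_rows.flatten, ∀ ci, PySem.Dict.get? ⟨col_map⟩ p.1 = some ci →
      PySem.Raise.InRange num_cols.toNat ci := by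
  intro p hp ci hg
  obtain ⟨row, hrow, hpr⟩ := List.mem_flatten.1 hp
  unfold Pre_compute_column_bounds_py at hpre
  rw [List.all_eq_true] at hpre
  have := hpre row hrow
  rw [List.all_eq_true] at this
  have := this p hpr
  rw [hg] at this
  exact of_decide_eq_true this

-- both outputs, slot by slot
theorem pv_main (data_rows : List (List (Int × String))) (col_map : List (Int × Int)) (num_cols : Int)
    (hpre : Pre_compute_column_bounds_py data_rows col_map num_cols) :
    ∀ k : Nat,
      (compute_column_bounds_py data_rows col_map num_cols)[k]? =
        (if k < num_cols.toNat then some (pvConvA ((pvSpans data_rows col_map num_cols k).foldl pvAcc (none, 0))) else none) ∧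
      (compute_column_bounds_py_alt data_rows col_map num_cols)[k]? =
        (if k < num_cols.toNat then some (pvRed (pvSpans data_rows col_map num_cols k)) else none) := by
  intro k
  have hpre' := pv_pre_flat hpre
  have hNr : ((PySem.List.pyRange 0 num_cols 1).map (fun _ => ([] : List (Int × Int)))).length = num_cols.toNat := by
    simp [PySem.List.length_pyRange_one]
  have hNa : ((PySem.List.pyRange 0 num_cols 1).map (fun _ => ((none : Option Int), (0 : Int)))).length = num_cols.toNat := by
    simp [PySem.List.length_pyRange_one]
  have hInitB : ∀ k : Nat, ((PySem.List.pyRange 0 num_cols 1).map (fun _ => ([] : List (Int × Int))))[k]? =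
      if k < num_cols.toNat then some ([] : List (Int × Int)) else none := by
    intro k
    simp [List.getElem?_replicate, PySem.List.length_pyRange_one]
  obtain ⟨hBlen, hBk⟩ := pv_invB col_map num_cols data_rows.flatten _ hNr hpre'
  have hAk := pv_invAB col_map num_cols data_rows.flatten _ _ hNa hNr hpre' (by
    intro k
    simp only [List.map_const', List.getElem?_replicate, PySem.List.length_pyRange_one]
    split_ifs <;> rfl)
  have hBfin : (data_rows.flatten.foldl (pvFB col_map)
      ((PySem.List.pyRange 0 num_cols 1).map (fun _ => [])))[k]? =
      if k < num_cols.toNat then some (pvSpans data_rows col_map num_cols k) else none := by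
    rw [hBk k, hInitB k]
    split_ifs
    · simp [pvSpans]
    · rfl
  constructor
  · rw [pv_A_unfold, List.getElem?_map, hAk k, hBfin]
    split_ifs <;> rfl
  · rw [pv_B_unfold, List.getElem?_map, hBfin]
    split_ifs <;> rfl

-- ===== VERDICT (by name: the statement is the Claim_ definition above) =====
theorem compute_column_bounds_py_spec : Claim_unchanged_compute_column_bounds_py := by
  intro data_rows col_map num_cols _ hpre hnD
  rw [pv_D_iff] at hnD
  push_neg at hnD
  apply List.ext_getElem?
  intro k
  obtain ⟨hA, hB⟩ := pv_main data_rows col_map num_cols hpre k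
  rw [hA, hB]
  split_ifs with hk
  · congr 1
    apply pv_col_eq
    intro hne
    obtain ⟨p, hp, hp2⟩ := hnD k hk hne
    exact ⟨p, hp, by omega⟩
  · rfl

theorem compute_column_bounds_py_changed : Claim_changed_compute_column_bounds_py := by
  unfold Claim_changed_compute_column_bounds_py; decide

theorem compute_column_bounds_py_tight : Claim_exact_compute_column_bounds_py := by
  intro data_rows col_map num_cols _ hpre hD
  rw [pv_D_iff] at hD
  obtain ⟨k, hk, hne, hall⟩ := hD
  intro hEq
  obtain ⟨hA, hB⟩ := pv_main data_rows col_map num_cols hpre k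
  rw [hEq, hB, if_pos hk, if_pos hk] at hA
  exact pv_col_ne _ hne hall (Option.some.inj hA).symm
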